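-- pv_equiv track=rewrite | github.com/queenJiJi/Algorithm_Study | nossidev/7주차/컴퓨터감염.py | solution
-- ===== SOURCE A (Python) =====
-- from collections import defaultdict
--
-- def solution(n, edges):
--   graph = defaultdict(list)
--
--   # 단방향 그래프 생성
--   for u,v in edges:
--     graph[u].append(v)
--
--   # dfs 재귀함수로 순회
--   def dfs(cur_node):
--     # 다음에 감염될 노드들의 집합
--     child_node = set()
--     for node in cur_node:
--       for child in graph[node]:
--         child_node.add(child)
--     result = len(cur_node)
--     if child_node:
--       min_dfs_result = float('inf')
--       # 다음 노드 중 하나를 제외하고 재귀함수 호출(간선 하나를 잘랐다 했을 때)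
--       for child in child_node:
--         min_dfs_result = min(min_dfs_result, dfs(child_node-set([child])))
--       # 호출 결과 중 가장 작은 값을현재 층의 노드수에 더해 반환
--       result += min_dfs_result
--     return result
--   return dfs(set([0])) # 루트노드부터 바이러스 시작이니 루트노드부터 탐색 시작
-- ===== SOURCE B (Python) =====
-- def solution(n, edges):
--     graph = {}
--     for u, v in edges:
--         graph.setdefault(u, []).append(v)
--     memo = {}
--
--     def dfs(cur):
--         key = tuple(sorted(cur))
--         if key in memo:
--             return memo[key]
--         nxt = frozenset(c for node in cur for c in graph.get(node, ()))
--         result = len(cur)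
--         if nxt:
--             result += min(dfs(nxt - {c}) for c in nxt)
--         memo[key] = result
--         return result
--
--     return dfs(frozenset([0]))
-- ===== Notes on version B (the rewrite author's own statement) =====
-- stated objective: faster
-- what changed: B memoizes the dfs on the frozen node-set state (dynamic programming keyed by tuple(sorted(cur))), so each distinct level-set is solved once instead of recomputed exponentially often.
import Mathlib
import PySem

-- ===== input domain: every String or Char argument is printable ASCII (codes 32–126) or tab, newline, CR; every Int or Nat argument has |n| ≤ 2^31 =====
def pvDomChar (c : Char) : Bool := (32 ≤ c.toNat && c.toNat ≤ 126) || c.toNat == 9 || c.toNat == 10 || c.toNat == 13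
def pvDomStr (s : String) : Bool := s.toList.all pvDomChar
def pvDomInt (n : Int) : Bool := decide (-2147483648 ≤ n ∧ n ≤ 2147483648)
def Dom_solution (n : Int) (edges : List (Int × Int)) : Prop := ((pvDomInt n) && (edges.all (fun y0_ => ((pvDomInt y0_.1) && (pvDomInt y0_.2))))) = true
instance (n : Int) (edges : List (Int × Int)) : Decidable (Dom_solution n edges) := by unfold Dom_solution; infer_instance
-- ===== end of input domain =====

-- B replaces A's naive exponential set-recursion by the same recursion memoized on the
-- (sorted) node-set, caching repeated states (dynamic programming over node-sets).

-- ===== PORT A =====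
-- graph = defaultdict(list); for u,v in edges: graph[u].append(v)
def pvGraphA (edges : List (Int × Int)) : PySem.Dict Int (List Int) :=
  edges.foldl (fun g e => g.modify e.1 [] (fun l => l ++ [e.2])) PySem.Dict.empty

-- child_node = set(); for node in cur_node: for child in graph[node]: child_node.add(child)
def pvChildrenA (g : PySem.Dict Int (List Int)) (cur : List Int) : PySem.Set Int :=
  cur.foldl (fun s node => (g.getD node []).foldl (fun s c => PySem.Set.add s c) s) PySem.Set.empty

-- Fuel infrastructure shared by both ports (a port artifact only: Python's recursion has no
-- fuel; Pre_solution below proves this fuel is never exhausted).  A recursion STATE is the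
-- set of currently infected nodes; canonically it is kept as a sorted duplicate-free list.
def pvCanon (S : List Int) : List Int := PySem.List.sorted S (fun x => x) false

-- the child set of a state, as a PySem.Set
def pvKids (E : List (Int × Int)) (S : List Int) : List Int :=
  PySem.Set.ofList (S.flatMap (fun u => (pvGraphA E).getD u []))

-- the successor states of a canonical state (one child removed from the child set)
def pvSuccs (E : List (Int × Int)) (S : List Int) : List (List Int) :=
  (pvKids E S).map (fun c => pvCanon (PySem.Set.diff (pvKids E S) [c]))

-- one closure round: add every successor of every known state
def pvCStep (E : List (Int × Int)) (L : List (List Int)) : List (List Int) :=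
  L.foldl (fun acc S => PySem.Set.update acc (pvSuccs E S)) L

-- closure of the state graph from the start state [0] (early exit at the fixpoint;
-- 2^(|E|+1) rounds provably suffice)
def pvCloseAux (E : List (Int × Int)) : Nat → List (List Int) → List (List Int)
  | 0, L => L
  | k + 1, L => if pvCStep E L = L then L else pvCloseAux E k (pvCStep E L)

def pvStates (E : List (Int × Int)) : List (List Int) :=
  pvCloseAux E (2 ^ (E.length + 1)) [[0]]

-- recursion fuel: one more than the number of reachable states
def pvFuel (E : List (Int × Int)) : Nat := (pvStates E).length + 1

-- A's recursive dfs.  min_dfs_result = float('inf') is the `none` of the Option Int accumulator.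
def pvDfsA (g : PySem.Dict Int (List Int)) : Nat → List Int → Int
  | 0, _ => 0
  | f + 1, cur =>
    let childs := pvChildrenA g cur
    let result : Int := (cur.length : Int)
    if childs = [] then result
    else
      let m := childs.foldl
        (fun (mo : Option Int) c =>
          let v := pvDfsA g f (PySem.Set.diff childs [c])
          some (match mo with | none => v | some m => min m v)) none
      result + m.getD 0

def solution (n : Int) (edges : List (Int × Int)) : Int :=
  pvDfsA (pvGraphA edges) (pvFuel edges) (PySem.Set.ofList [0])

-- ===== PORT B =====
-- graph.setdefault(u, []).append(v)
def pvGraphB (edges : List (Int × Int)) : PySem.Dict Int (List Int) :=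
  edges.foldl (fun g e => g.modify e.1 [] (fun l => l ++ [e.2])) PySem.Dict.empty

-- B's dfs with a memo dict keyed by tuple(sorted(cur)); returns (value, memo).
def pvDfsB (g : PySem.Dict Int (List Int)) :
    Nat → List Int → PySem.Dict (List Int) Int → Int × PySem.Dict (List Int) Int
  | 0, _, memo => (0, memo)
  | f + 1, cur, memo =>
    let key := PySem.List.sorted cur (fun x => x) false
    match memo.get? key with
    | some v => (v, memo)
    | none =>
      -- nxt = frozenset(c for node in cur for c in graph.get(node, ()))
      let nxt : PySem.Set Int := PySem.Set.ofList (cur.flatMap (fun node => g.getD node []))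
      let base : Int := (cur.length : Int)
      if nxt = [] then (base, memo.insert key base)
      else
        -- result += min(dfs(nxt - {c}) for c in nxt), threading the memo through the fold
        let p := nxt.foldl
          (fun (p : Option Int × PySem.Dict (List Int) Int) c =>
            let r := pvDfsB g f (PySem.Set.diff nxt [c]) p.2
            (some (match p.1 with | none => r.1 | some m => min m r.1), r.2))
          (none, memo)
        let res := base + p.1.getD 0
        (res, p.2.insert key res)

def solution_alt (n : Int) (edges : List (Int × Int)) : Int :=
  (pvDfsB (pvGraphB edges) (pvFuel edges) (PySem.Set.ofList [0]) PySem.Dict.empty).1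

-- ===== PRECONDITION & SPEC =====
-- one peeling round: keep only states that still have a successor among the kept states
def pvPStep (E : List (Int × Int)) (L : List (List Int)) : List (List Int) :=
  L.filter (fun S => (pvSuccs E S).any (fun T => decide (T ∈ L)))

def pvPeel (E : List (Int × Int)) : Nat → List (List Int) → List (List Int)
  | 0, L => L
  | k + 1, L => pvPeel E k (pvPStep E L)

-- Pre_ excludes exactly the inputs on which A does not return: those where the level-set
-- transition graph reachable from {0} contains a cycle, so A's unmemoized recursion revisits
-- a state forever and dies with RecursionError.  It holds on every input where A returns
-- (acyclicity is checked by peeling successor-less states until nothing is left).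
def Pre_solution (n : Int) (edges : List (Int × Int)) : Prop :=
  pvPeel edges (pvStates edges).length (pvStates edges) = []
instance (n : Int) (edges : List (Int × Int)) : Decidable (Pre_solution n edges) := by
  unfold Pre_solution; infer_instance

def pvWitness_solution : Int × (List (Int × Int)) := (2, [(0, 1)])

def Spec_solution (n : Int) (edges : List (Int × Int)) (out : Int) : Prop := out = solution_alt n edges
instance (n : Int) (edges : List (Int × Int)) (out : Int) : Decidable (Spec_solution n edges out) := by unfold Spec_solution; infer_instance

-- ===== CLAIM (what is proved, stated in full; the proofs are below) =====
def Claim_equal_solution : Prop := ∀ (n : Int) (edges : List (Int × Int)), Dom_solution n edges → Pre_solution n edges → Spec_solution n edges (solution n edges)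

-- ===== LEMMAS AND PROOFS =====

-- the graph dict: adjacency of u is exactly the targets of the edges out of u, in order
theorem pv_getD_graphA (E : List (Int × Int)) (u : Int) :
    (pvGraphA E).getD u [] = (E.filter (fun e => e.1 == u)).map (·.2) := by
  simpa [pvGraphA, PySem.Dict.getD_empty] using
    PySem.Dict.getD_foldl_modify_append E PySem.Dict.empty u

theorem pv_mem_graphA (E : List (Int × Int)) (u x : Int) :
    x ∈ (pvGraphA E).getD u [] ↔ (u, x) ∈ E := by
  rw [pv_getD_graphA]
  simp only [List.mem_map, List.mem_filter, beq_iff_eq]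
  constructor
  · rintro ⟨⟨a, b⟩, ⟨hm, h1⟩, h2⟩
    simp only at h1 h2
    subst h1; subst h2; exact hm
  · intro h; exact ⟨(u, x), ⟨h, rfl⟩, rfl⟩

theorem pv_foldl_update (lst : Int → List Int) : ∀ (S : List Int) (acc : List Int),
    S.foldl (fun s node => (lst node).foldl (fun s c => PySem.Set.add s c) s) acc
      = PySem.Set.update acc (S.flatMap lst)
  | [], acc => rfl
  | a :: S, acc => by
    simp only [List.foldl_cons, List.flatMap_cons]
    rw [pv_foldl_update lst S, PySem.Set.update_append]
    rfl

theorem pv_childrenA_eq (E : List (Int × Int)) (S : List Int) :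
    pvChildrenA (pvGraphA E) S = pvKids E S := by
  rw [pvChildrenA, pvKids, pv_foldl_update]
  rfl

theorem pv_mem_kids (E : List (Int × Int)) (S : List Int) (x : Int) :
    x ∈ pvKids E S ↔ ∃ u ∈ S, (u, x) ∈ E := by
  simp [pvKids, PySem.Set.mem_ofList, List.mem_flatMap, pv_mem_graphA]

theorem pv_nodup_kids (E : List (Int × Int)) (S : List Int) : (pvKids E S).Nodup :=
  PySem.Set.nodup_ofList _

theorem pv_kids_perm (E : List (Int × Int)) {S S' : List Int} (h : S.Perm S') :
    (pvKids E S).Perm (pvKids E S') := by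
  rw [List.perm_ext_iff_of_nodup (pv_nodup_kids E S) (pv_nodup_kids E S')]
  intro x
  simp only [pv_mem_kids]
  constructor <;> rintro ⟨u, hu, he⟩
  · exact ⟨u, h.mem_iff.mp hu, he⟩
  · exact ⟨u, h.mem_iff.mpr hu, he⟩

-- ---- canonical states ----
theorem pv_canon_perm (S : List Int) : (pvCanon S).Perm S :=
  PySem.List.sorted_perm S (fun x => x) false

theorem pv_canon_nodup {S : List Int} (h : S.Nodup) : (pvCanon S).Nodup :=
  (pv_canon_perm S).nodup_iff.mpr h

theorem pv_canon_mem (S : List Int) (x : Int) : x ∈ pvCanon S ↔ x ∈ S :=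
  (pv_canon_perm S).mem_iff

theorem pv_canon_pairwise_lt {S : List Int} (h : S.Nodup) :
    (pvCanon S).Pairwise (· < ·) := by
  have h1 : (pvCanon S).Pairwise (· ≤ ·) :=
    PySem.List.sorted_pairwise S (fun x => x) 
  have h2 : (pvCanon S).Pairwise (· ≠ ·) := pv_canon_nodup h
  exact (h1.and h2).imp (fun hab => lt_of_le_of_ne hab.1 hab.2)

theorem pv_canon_eq_of_perm {S T : List Int} (hS : S.Nodup) (h : S.Perm T) :
    pvCanon S = pvCanon T := by
  exact (PySem.List.sorted_eq_of_perm_of_pairwise_lt T (pvCanon S) (fun x => x)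
    ((pv_canon_perm S).trans h) (pv_canon_pairwise_lt hS)).symm

-- ---- the universe of node values and well-formed states ----
def pvU (E : List (Int × Int)) : List Int := 0 :: E.map (·.2)

def pvStOk (E : List (Int × Int)) (S : List Int) : Prop :=
  S.Pairwise (· < ·) ∧ ∀ x ∈ S, x ∈ pvU E

theorem pv_kids_sub_U (E : List (Int × Int)) (S : List Int) :
    ∀ x ∈ pvKids E S, x ∈ pvU E := by
  intro x hx
  obtain ⟨u, _, he⟩ := (pv_mem_kids E S x).mp hx
  exact List.mem_cons_of_mem _ (List.mem_map.mpr ⟨(u, x), he, rfl⟩)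

theorem pv_succs_ok (E : List (Int × Int)) (S T : List Int) (hT : T ∈ pvSuccs E S) :
    pvStOk E T := by
  obtain ⟨c, _, rfl⟩ := List.mem_map.mp hT
  constructor
  · exact pv_canon_pairwise_lt (PySem.Set.nodup_diff _ _ (pv_nodup_kids E S))
  · intro x hx
    rw [pv_canon_mem] at hx
    exact pv_kids_sub_U E S x ((PySem.Set.mem_diff _ _ _).mp hx).1

-- ---- closure: structural facts ----
theorem pv_cstep_append (E : List (Int × Int)) : ∀ (l : List (List Int)) (acc : List (List Int)),
    ∃ t, l.foldl (fun acc S => PySem.Set.update acc (pvSuccs E S)) acc = acc ++ t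
  | [], acc => ⟨[], by simp⟩
  | S :: l, acc => by
    simp only [List.foldl_cons]
    obtain ⟨t1, ht1⟩ : ∃ t1, PySem.Set.update acc (pvSuccs E S) = acc ++ t1 := by
      rw [PySem.Set.update_eq_append_filter]; exact ⟨_, rfl⟩
    obtain ⟨t2, ht2⟩ := pv_cstep_append E l (PySem.Set.update acc (pvSuccs E S))
    exact ⟨t1 ++ t2, by rw [ht2, ht1, List.append_assoc]⟩

theorem pv_mem_cstep_foldl (E : List (Int × Int)) :
    ∀ (l : List (List Int)) (acc : List (List Int)) (T : List Int),
      T ∈ l.foldl (fun acc S => PySem.Set.update acc (pvSuccs E S)) acc ↔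
        T ∈ acc ∨ ∃ S ∈ l, T ∈ pvSuccs E S
  | [], acc, T => by simp
  | S :: l, acc, T => by
    simp only [List.foldl_cons]
    rw [pv_mem_cstep_foldl E l _ T, PySem.Set.mem_update]
    constructor
    · rintro (⟨h | h⟩ | ⟨S', hS', hT⟩)
      · exact Or.inl h
      · exact Or.inr ⟨S, List.mem_cons_self, h⟩
      · exact Or.inr ⟨S', List.mem_cons_of_mem _ hS', hT⟩
    · rintro (h | ⟨S', hS', hT⟩)
      · exact Or.inl (Or.inl h)
      · rcases List.mem_cons.mp hS' with h | h
        · subst h; exact Or.inl (Or.inr hT)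
        · exact Or.inr ⟨S', h, hT⟩

theorem pv_nodup_cstep_foldl (E : List (Int × Int)) :
    ∀ (l : List (List Int)) (acc : List (List Int)), acc.Nodup →
      (l.foldl (fun acc S => PySem.Set.update acc (pvSuccs E S)) acc).Nodup
  | [], _, h => h
  | S :: l, acc, h => by
    simp only [List.foldl_cons]
    exact pv_nodup_cstep_foldl E l _ (PySem.Set.nodup_update _ _ h)

theorem pv_sub_cstep (E : List (Int × Int)) (L : List (List Int)) : L ⊆ pvCStep E L := by
  obtain ⟨t, ht⟩ := pv_cstep_append E L L
  rw [pvCStep, ht]; exact List.subset_append_left _ _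

theorem pv_cstep_ok (E : List (Int × Int)) (L : List (List Int))
    (h : ∀ S ∈ L, pvStOk E S) : ∀ S ∈ pvCStep E L, pvStOk E S := by
  intro T hT
  rcases (pv_mem_cstep_foldl E L L T).mp hT with h1 | ⟨S, _, hT⟩
  · exact h T h1
  · exact pv_succs_ok E S T hT

-- ---- cardinality bound: a nodup list of well-formed states over pvU E ----
theorem pv_stok_inj {E : List (Int × Int)} {S T : List Int}
    (hS : pvStOk E S) (hT : pvStOk E T) (h : S.toFinset = T.toFinset) : S = T := by
  have hndS : S.Nodup := hS.1.imp (fun hab => ne_of_lt hab)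
  have hndT : T.Nodup := hT.1.imp (fun hab => ne_of_lt hab)
  have hperm : S.Perm T := by
    rw [List.perm_ext_iff_of_nodup hndS hndT]
    intro x
    rw [← List.mem_toFinset, ← List.mem_toFinset, h]
  exact List.Perm.eq_of_pairwise
    (fun a b _ _ h1 h2 => absurd h1 (lt_asymm h2)) hS.1 hT.1 hperm

theorem pv_card_bound (E : List (Int × Int)) (L : List (List Int)) (hnd : L.Nodup)
    (hok : ∀ S ∈ L, pvStOk E S) : L.length ≤ 2 ^ (E.length + 1) := by
  have hmapnd : (L.map List.toFinset).Nodup := by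
    refine List.Nodup.map_on ?_ hnd
    intro S hS T hT h
    exact pv_stok_inj (hok S hS) (hok T hT) h
  have hsub : ∀ F ∈ L.map List.toFinset, F ∈ (pvU E).toFinset.powerset := by
    intro F hF
    obtain ⟨S, hS, rfl⟩ := List.mem_map.mp hF
    rw [Finset.mem_powerset]
    intro x hx
    rw [List.mem_toFinset] at hx ⊢
    exact (hok S hS).2 x hx
  calc L.length = (L.map List.toFinset).length := (List.length_map _).symm
    _ = (L.map List.toFinset).toFinset.card := (List.toFinset_card_of_nodup hmapnd).symm
    _ ≤ (pvU E).toFinset.powerset.card := Finset.card_le_card (fun F hF => by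
          rw [List.mem_toFinset] at hF; exact hsub F hF)
    _ = 2 ^ (pvU E).toFinset.card := Finset.card_powerset _
    _ ≤ 2 ^ (pvU E).length := Nat.pow_le_pow_right (by norm_num) (pvU E).toFinset_card_le
    _ = 2 ^ (E.length + 1) := by simp [pvU]

-- ---- closure reaches its fixpoint ----
theorem pv_closeAux_sub (E : List (Int × Int)) : ∀ (k : Nat) (L : List (List Int)),
    L ⊆ pvCloseAux E k L
  | 0, L => fun _ h => h
  | k + 1, L => by
    rw [pvCloseAux]
    split_ifs with h
    · exact fun _ h => h
    · exact List.Subset.trans (pv_sub_cstep E L) (pv_closeAux_sub E k _)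

theorem pv_closeAux_nodup_ok (E : List (Int × Int)) : ∀ (k : Nat) (L : List (List Int)),
    L.Nodup → (∀ S ∈ L, pvStOk E S) →
    (pvCloseAux E k L).Nodup ∧ (∀ S ∈ pvCloseAux E k L, pvStOk E S)
  | 0, L, hnd, hok => ⟨hnd, hok⟩
  | k + 1, L, hnd, hok => by
    rw [pvCloseAux]
    split_ifs with h
    · exact ⟨hnd, hok⟩
    · exact pv_closeAux_nodup_ok E k _ (pv_nodup_cstep_foldl E L L hnd) (pv_cstep_ok E L hok)

theorem pv_closeAux_fix_or_grow (E : List (Int × Int)) : ∀ (k : Nat) (L : List (List Int)),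
    pvCStep E (pvCloseAux E k L) = pvCloseAux E k L ∨
      L.length + k ≤ (pvCloseAux E k L).length
  | 0, L => Or.inr (by simp [pvCloseAux])
  | k + 1, L => by
    rw [pvCloseAux]
    split_ifs with h
    · exact Or.inl h
    · rcases pv_closeAux_fix_or_grow E k (pvCStep E L) with h1 | h1
      · exact Or.inl h1
      · right
        obtain ⟨t, ht⟩ := pv_cstep_append E L L
        have htne : t ≠ [] := by rintro rfl; simp at ht; exact h (by rw [pvCStep, ht])
        have : L.length + 1 ≤ (pvCStep E L).length := by
          rw [pvCStep, ht, List.length_append]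
          have := List.length_pos_iff.mpr htne
          omega
        omega

theorem pv_states_nodup_ok (E : List (Int × Int)) :
    (pvStates E).Nodup ∧ ∀ S ∈ pvStates E, pvStOk E S := by
  refine pv_closeAux_nodup_ok E _ [[0]] (by simp) ?_
  intro S hS
  simp only [List.mem_singleton] at hS
  subst hS
  exact ⟨by simp, by intro x hx; simp only [List.mem_singleton] at hx; subst hx; simp [pvU]⟩

theorem pv_states_fix (E : List (Int × Int)) : pvCStep E (pvStates E) = pvStates E := by
  rcases pv_closeAux_fix_or_grow E (2 ^ (E.length + 1)) [[0]] with h | h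
  · exact h
  · exfalso
    have hb := pv_card_bound E (pvStates E) (pv_states_nodup_ok E).1 (pv_states_nodup_ok E).2
    have : [[0]].length + 2 ^ (E.length + 1) ≤ (pvStates E).length := h
    simp only [List.length_cons, List.length_nil] at this
    unfold pvStates at hb this
    omega

theorem pv_start_mem_states (E : List (Int × Int)) : [(0 : Int)] ∈ pvStates E :=
  pv_closeAux_sub E _ [[0]] (List.mem_singleton.mpr rfl)

theorem pv_succs_mem_states (E : List (Int × Int)) {S T : List Int}
    (hS : S ∈ pvStates E) (hT : T ∈ pvSuccs E S) : T ∈ pvStates E := by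
  rw [← pv_states_fix E]
  exact (pv_mem_cstep_foldl E (pvStates E) (pvStates E) T).mpr (Or.inr ⟨S, hS, hT⟩)

-- ---- peeling ----
theorem pv_peel_sub (E : List (Int × Int)) : ∀ (k : Nat) (L : List (List Int)),
    pvPeel E k L ⊆ L
  | 0, _ => fun _ h => h
  | k + 1, L =>
    fun _ hx => List.mem_of_mem_filter (pv_peel_sub E k (pvPStep E L) hx)

theorem pv_dead_succ (E : List (Int × Int)) : ∀ (k : Nat) (L : List (List Int)) (S : List Int),
    S ∈ L → S ∉ pvPeel E (k + 1) L → ∀ T ∈ pvSuccs E S, T ∉ pvPeel E k L := by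
  intro k
  induction k with
  | zero =>
    intro L S hSL hS T hT hTL
    apply hS
    show S ∈ pvPStep E L
    rw [pvPStep, List.mem_filter]
    refine ⟨hSL, ?_⟩
    simp only [List.any_eq_true, decide_eq_true_eq]
    exact ⟨T, hT, hTL⟩
  | succ k ih =>
    intro L S hSL hS T hT
    by_cases hSp : S ∈ pvPStep E L
    · exact ih (pvPStep E L) S hSp hS T hT
    · intro hTk
      apply hSp
      rw [pvPStep, List.mem_filter]
      refine ⟨hSL, ?_⟩
      simp only [List.any_eq_true, decide_eq_true_eq]
      exact ⟨T, hT, pv_peel_sub E (k + 1) L hTk⟩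

-- ---- A's dfs: value independent of the list order of the state ----
def pvStep (E : List (Int × Int)) (f : Nat) (C : List Int) : Option Int → Int → Option Int :=
  fun mo c =>
    some (match mo with
      | none => pvDfsA (pvGraphA E) f (PySem.Set.diff C [c])
      | some m => min m (pvDfsA (pvGraphA E) f (PySem.Set.diff C [c])))

theorem pv_dfsA_succ (E : List (Int × Int)) (f : Nat) (S : List Int) :
    pvDfsA (pvGraphA E) (f + 1) S =
      if pvKids E S = [] then (S.length : Int)
      else (S.length : Int) + ((pvKids E S).foldl (pvStep E f (pvKids E S)) none).getD 0 := by
  unfold pvDfsA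
  rw [pv_childrenA_eq]
  rfl

theorem pv_step_rightcomm (E : List (Int × Int)) (f : Nat) (C : List Int)
    (mo : Option Int) (x y : Int) :
    pvStep E f C (pvStep E f C mo x) y = pvStep E f C (pvStep E f C mo y) x := by
  cases mo <;> simp only [pvStep] <;> congr 1 <;> omega

theorem pv_diff_perm {C C' : List Int} (hnd : C.Nodup) (hnd' : C'.Nodup)
    (h : C.Perm C') (c : Int) :
    (PySem.Set.diff C [c]).Perm (PySem.Set.diff C' [c]) := by
  rw [List.perm_ext_iff_of_nodup (PySem.Set.nodup_diff _ _ hnd) (PySem.Set.nodup_diff _ _ hnd')]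
  intro x
  simp only [PySem.Set.mem_diff, h.mem_iff]

theorem pv_dfsA_perm (E : List (Int × Int)) :
    ∀ (f : Nat) {S S' : List Int}, S.Perm S' →
      pvDfsA (pvGraphA E) f S = pvDfsA (pvGraphA E) f S' := by
  intro f
  induction f with
  | zero => intro S S' _; rfl
  | succ f ih =>
    intro S S' h
    rw [pv_dfsA_succ, pv_dfsA_succ, h.length_eq]
    have hCC' : (pvKids E S).Perm (pvKids E S') := pv_kids_perm E h
    have hnili : pvKids E S = [] ↔ pvKids E S' = [] := by
      constructor
      · intro hn; exact (hn ▸ hCC').symm.eq_nil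
      · intro hn; exact (hn ▸ hCC'.symm).symm.eq_nil
    by_cases hnil : pvKids E S = []
    · rw [if_pos hnil, if_pos (hnili.mp hnil)]
    · rw [if_neg hnil, if_neg (fun hn => hnil (hnili.mpr hn))]
      congr 2
      have hstep : ∀ (mo : Option Int), ∀ c ∈ pvKids E S',
          pvStep E f (pvKids E S') mo c = pvStep E f (pvKids E S) mo c := by
        intro mo c _
        have : pvDfsA (pvGraphA E) f (PySem.Set.diff (pvKids E S') [c]) =
            pvDfsA (pvGraphA E) f (PySem.Set.diff (pvKids E S) [c]) :=
          ih (pv_diff_perm (pv_nodup_kids E S') (pv_nodup_kids E S) hCC'.symm c)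
        simp only [pvStep, this]
      rw [PySem.List.foldl_congr_mem (pvKids E S') (pvStep E f (pvKids E S')) (pvStep E f (pvKids E S)) none hstep]
      haveI : RightCommutative (pvStep E f (pvKids E S)) := ⟨pv_step_rightcomm E f (pvKids E S)⟩
      exact hCC'.foldl_eq none

-- canonical successor of a raw state
theorem pv_succ_of_raw (E : List (Int × Int)) (S : List Int) {c : Int}
    (hc : c ∈ pvKids E S) :
    pvCanon (PySem.Set.diff (pvKids E S) [c]) ∈ pvSuccs E (pvCanon S) := by
  have hperm : (pvKids E S).Perm (pvKids E (pvCanon S)) :=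
    pv_kids_perm E (pv_canon_perm S).symm
  have hc' : c ∈ pvKids E (pvCanon S) := hperm.mem_iff.mp hc
  have heq : pvCanon (PySem.Set.diff (pvKids E S) [c]) =
      pvCanon (PySem.Set.diff (pvKids E (pvCanon S)) [c]) :=
    pv_canon_eq_of_perm (PySem.Set.nodup_diff _ _ (pv_nodup_kids E S))
      (pv_diff_perm (pv_nodup_kids E S) (pv_nodup_kids E (pvCanon S)) hperm c)
  rw [heq]
  exact List.mem_map.mpr ⟨c, hc', rfl⟩

-- ---- A's dfs: the value is fuel-independent once the fuel covers the peel rank ----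
theorem pv_dfsA_stable (E : List (Int × Int)) :
    ∀ (k : Nat) (f f' : Nat) (S : List Int), pvCanon S ∈ pvStates E →
      pvCanon S ∉ pvPeel E k (pvStates E) → k ≤ f → k ≤ f' →
      pvDfsA (pvGraphA E) f S = pvDfsA (pvGraphA E) f' S := by
  intro k
  induction k with
  | zero =>
    intro f f' S hmem hdead _ _
    exact absurd hmem hdead
  | succ k ih =>
    intro f f' S hmem hdead h1 h2
    rcases f with _ | f0; · omega
    rcases f' with _ | f0'; · omega
    rw [pv_dfsA_succ, pv_dfsA_succ]
    by_cases hnil : pvKids E S = []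
    · rw [if_pos hnil, if_pos hnil]
    · rw [if_neg hnil, if_neg hnil]
      congr 2
      refine PySem.List.foldl_congr_mem _ _ _ _ ?_
      intro mo c hc
      have hsucc := pv_succ_of_raw E S hc
      have heq : pvDfsA (pvGraphA E) f0 (PySem.Set.diff (pvKids E S) [c]) =
          pvDfsA (pvGraphA E) f0' (PySem.Set.diff (pvKids E S) [c]) := by
        exact ih f0 f0' _ (pv_succs_mem_states E hmem hsucc)
          (pv_dead_succ E k (pvStates E) (pvCanon S) hmem hdead _ hsucc)
          (by omega) (by omega)
      simp only [pvStep, heq]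

-- ---- the memo invariant and B's correctness ----
def pvInv (E : List (Int × Int)) (memo : PySem.Dict (List Int) Int) : Prop :=
  ∀ k v, memo.get? k = some v → v = pvDfsA (pvGraphA E) (pvFuel E) k

def pvStepB (E : List (Int × Int)) (f : Nat) (C : List Int) :
    (Option Int × PySem.Dict (List Int) Int) → Int → (Option Int × PySem.Dict (List Int) Int) :=
  fun p c =>
    let r := pvDfsB (pvGraphA E) f (PySem.Set.diff C [c]) p.2
    (some (match p.1 with | none => r.1 | some m => min m r.1), r.2)

theorem pv_dfsB_succ (E : List (Int × Int)) (f : Nat) (S : List Int)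
    (memo : PySem.Dict (List Int) Int) :
    pvDfsB (pvGraphA E) (f + 1) S memo =
      match memo.get? (pvCanon S) with
      | some v => (v, memo)
      | none =>
        if pvKids E S = [] then
          ((S.length : Int), memo.insert (pvCanon S) (S.length : Int))
        else
          let p := (pvKids E S).foldl (pvStepB E f (pvKids E S)) (none, memo)
          ((S.length : Int) + p.1.getD 0,
            p.2.insert (pvCanon S) ((S.length : Int) + p.1.getD 0)) := by
  rfl

theorem pv_fuel_pos (E : List (Int × Int)) : ∃ t, pvFuel E = t + 1 :=
  ⟨(pvStates E).length, rfl⟩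

theorem pv_dfsB_correct (E : List (Int × Int)) :
    ∀ (k f : Nat) (S : List Int) (memo : PySem.Dict (List Int) Int),
      pvCanon S ∈ pvStates E → pvCanon S ∉ pvPeel E k (pvStates E) →
      k ≤ f → k ≤ pvFuel E → pvInv E memo →
      (pvDfsB (pvGraphA E) f S memo).1 = pvDfsA (pvGraphA E) (pvFuel E) S ∧
        pvInv E (pvDfsB (pvGraphA E) f S memo).2 := by
  intro k
  induction k with
  | zero =>
    intro f S memo hmem hdead _ _ _
    exact absurd hmem hdead
  | succ k ih =>
    intro f S memo hmem hdead h1 h2 hInv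
    rcases f with _ | f0; · omega
    rw [pv_dfsB_succ]
    cases hget : memo.get? (pvCanon S) with
    | some v =>
      refine ⟨?_, hInv⟩
      show v = _
      rw [hInv _ v hget]
      exact pv_dfsA_perm E _ (pv_canon_perm S)
    | none =>
      obtain ⟨t, hFUEL⟩ := pv_fuel_pos E
      have hdfsAS : pvDfsA (pvGraphA E) (pvFuel E) S =
          if pvKids E S = [] then (S.length : Int)
          else (S.length : Int) + ((pvKids E S).foldl (pvStep E t (pvKids E S)) none).getD 0 := by
        rw [hFUEL, pv_dfsA_succ]
      have hInvIns : ∀ (d : PySem.Dict (List Int) Int), pvInv E d →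
          pvInv E (d.insert (pvCanon S) (pvDfsA (pvGraphA E) (pvFuel E) S)) := by
        intro d hd kk v hkv
        rw [PySem.Dict.get?_insert] at hkv
        split_ifs at hkv with hk
        · cases hkv
          subst hk
          exact (pv_dfsA_perm E _ (pv_canon_perm S)).symm
        · exact hd kk v hkv
      by_cases hnil : pvKids E S = []
      · simp only [if_pos hnil]
        refine ⟨?_, ?_⟩
        · show (S.length : Int) = _
          rw [hdfsAS, if_pos hnil]
        · show pvInv E (memo.insert _ _)
          have := hInvIns memo hInv
          rwa [hdfsAS, if_pos hnil] at this
      · simp only [if_neg hnil]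
        -- facts shared by every child state
        have hchild : ∀ c ∈ pvKids E S,
            pvCanon (PySem.Set.diff (pvKids E S) [c]) ∈ pvStates E ∧
            pvCanon (PySem.Set.diff (pvKids E S) [c]) ∉ pvPeel E k (pvStates E) := by
          intro c hc
          have hsucc := pv_succ_of_raw E S hc
          exact ⟨pv_succs_mem_states E hmem hsucc,
            pv_dead_succ E k (pvStates E) (pvCanon S) hmem hdead _ hsucc⟩
        -- the fold: B's threaded fold computes A's fold (at fuel t) and preserves the invariant
        have hfold : ∀ (L : List Int), (∀ c ∈ L, c ∈ pvKids E S) →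
            ∀ (acc : Option Int × PySem.Dict (List Int) Int), pvInv E acc.2 →
            (L.foldl
              (pvStepB E f0 (pvKids E S))
              acc).1 = L.foldl (pvStep E t (pvKids E S)) acc.1 ∧
              pvInv E (L.foldl
                (pvStepB E f0 (pvKids E S))
                acc).2 := by
          intro L
          induction L with
          | nil => intro _ acc hacc; exact ⟨rfl, hacc⟩
          | cons c L ihL =>
            intro hL acc hacc
            have hcC : c ∈ pvKids E S := hL c List.mem_cons_self
            obtain ⟨hcm, hcd⟩ := hchild c hcC
            have hrec := ih f0 (PySem.Set.diff (pvKids E S) [c]) acc.2 hcm hcd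
              (by omega) (by omega) hacc
            have hfuel : pvDfsA (pvGraphA E) (pvFuel E) (PySem.Set.diff (pvKids E S) [c]) =
                pvDfsA (pvGraphA E) t (PySem.Set.diff (pvKids E S) [c]) := by
              refine pv_dfsA_stable E k (pvFuel E) t _ hcm hcd (by omega) (by omega)
            simp only [List.foldl_cons]
            refine (ihL (fun x hx => hL x (List.mem_cons_of_mem c hx)) _ ?_).imp ?_ id
            · exact hrec.2
            · intro h
              rw [h]
              congr 1
              simp only [pvStepB, pvStep, hrec.1, hfuel]
        have hfold' := hfold (pvKids E S) (fun _ hx => hx) (none, memo) hInv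
        constructor
        · show (S.length : Int) + _ = _
          rw [hdfsAS, if_neg hnil, hfold'.1]
        · have hres : (S.length : Int) +
              ((pvKids E S).foldl
                (pvStepB E f0 (pvKids E S))
                (none, memo)).1.getD 0 =
              pvDfsA (pvGraphA E) (pvFuel E) S := by
            rw [hdfsAS, if_neg hnil, hfold'.1]
          rw [hres]
          exact hInvIns _ hfold'.2

-- ===== VERDICT (by name: the statement is the Claim_ definition above) =====
theorem solution_spec : Claim_equal_solution := by
  intro n E _hD hP
  show solution n E = solution_alt n E
  unfold solution solution_alt
  have hstart : PySem.Set.ofList [(0 : Int)] = [(0 : Int)] := rfl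
  have hcanon : pvCanon [(0 : Int)] = [(0 : Int)] := rfl
  have hPre : pvPeel E (pvStates E).length (pvStates E) = [] := hP
  have hdead : pvCanon [(0 : Int)] ∉ pvPeel E (pvStates E).length (pvStates E) := by
    rw [hPre]; exact List.not_mem_nil
  have h := pv_dfsB_correct E (pvStates E).length (pvFuel E) [(0 : Int)]
    PySem.Dict.empty (by rw [hcanon]; exact pv_start_mem_states E) hdead
    (by unfold pvFuel; omega) (by unfold pvFuel; omega)
    (by intro k v hkv; rw [PySem.Dict.get?_empty] at hkv; cases hkv)
  show pvDfsA (pvGraphA E) (pvFuel E) [(0 : Int)] =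
    (pvDfsB (pvGraphA E) (pvFuel E) [(0 : Int)] PySem.Dict.empty).1
  exact h.1.symm
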